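-- pv_equiv track=rewrite | github.com/PawelBalawender/misc | OI/par.py | avaliable
-- ===== SOURCE A (Python) =====
-- def avaliable(s):
--     pars = [0 for i in range(len(s) + 1)]  # +1 to include full-len substring
--
--     a = 0
--     b = sum(s) % 2
--
--     for i in range(len(s)):
--         ind_a = i
--         ind_b = len(s) - i
--         pars[ind_a] += a
--         pars[ind_b] += b
--         if s[i] % 2:
--             a = not a
--             b = not b
--
--     pars[0] *= 2
--     pars[-1] *= 2
--
--     cp = []
--     for i in pars:
--         if i == 0:
--             cp += [0]
--         elif i == 1:
--             cp += [2]
--         elif i == 2: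
--             cp += [1]
--     pars=cp
--     return pars
-- ===== SOURCE B (Python) =====
-- def avaliable(s):
--     # Two-pass prefix-parity formulation: prefix table + closed-form per index, endpoints explicit.
--     n = len(s)
--     prefix = [0]
--     p = 0
--     for x in s:
--         p = (p + x) % 2
--         prefix.append(p)
--     total = prefix[n]
--     if n == 0:
--         return [0]
--     remap = [0, 2, 1]
--     mid = [remap[prefix[j] + (total + prefix[n - j]) % 2] for j in range(1, n)]
--     return [0] + mid + [remap[2 * total]]
-- ===== Notes on version B (the rewrite author's own statement) =====
-- stated objective: alternative
-- what changed: Replaces A's single stateful loop that mutates both ends of the array per iteration (with flipping parity flags) by a prefix-parity table plus a closed-form second pass per index, with explicit endpoint handling and a remap table.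
import Mathlib
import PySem

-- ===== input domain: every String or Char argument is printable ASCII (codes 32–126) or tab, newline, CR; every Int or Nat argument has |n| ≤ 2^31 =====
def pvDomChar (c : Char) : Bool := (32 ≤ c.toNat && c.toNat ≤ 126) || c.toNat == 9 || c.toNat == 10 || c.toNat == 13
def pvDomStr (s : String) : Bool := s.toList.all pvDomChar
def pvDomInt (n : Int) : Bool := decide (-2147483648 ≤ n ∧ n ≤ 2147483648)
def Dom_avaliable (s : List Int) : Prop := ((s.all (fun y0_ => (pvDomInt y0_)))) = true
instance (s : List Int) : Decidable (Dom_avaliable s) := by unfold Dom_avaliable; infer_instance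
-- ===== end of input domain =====

-- B replaces A's single stateful end-mutating loop with flipping parity flags by a prefix-parity
-- table plus a closed-form second pass with explicit endpoints (alternative decomposition, same O(n)).


-- ===== PORT A =====
-- one loop iteration: pars[i] += a; pars[len(s)-i] += b; flip a,b if s[i] is odd
def avaliableStep (s : List Int) (n : Nat) (st : List Int × Int × Int) (i : Nat) : List Int × Int × Int :=
  let pars := (st.1.set i (st.1.getD i 0 + st.2.1))
  let pars := pars.set (n - i) (pars.getD (n - i) 0 + st.2.2)
  if PySem.Int.mod (s.getD i 0) 2 ≠ 0 then
    (pars, (if st.2.1 ≠ 0 then 0 else 1), (if st.2.2 ≠ 0 then 0 else 1))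
  else (pars, st.2.1, st.2.2)

def avaliable (s : List Int) : List Int :=
  let n := s.length
  let pars0 : List Int := (List.range (n+1)).map (fun _ => (0:Int))
  let res := (List.range n).foldl (avaliableStep s n) (pars0, 0, PySem.Int.mod s.sum 2)
  let pars := res.1
  let pars := pars.set 0 (pars.getD 0 0 * 2)
  let pars := pars.set n (pars.getD n 0 * 2)   -- pars[-1] *= 2
  pars.foldl (fun cp i =>
    if i = 0 then cp ++ [(0:Int)]
    else if i = 1 then cp ++ [2]
    else if i = 2 then cp ++ [1]
    else cp) []

-- ===== PORT B =====
def avaliable_alt (s : List Int) : List Int :=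
  let n := s.length
  let st := s.foldl (fun (st : List Int × Int) x =>
      let p := PySem.Int.mod (st.2 + x) 2
      (st.1 ++ [p], p)) ([(0:Int)], (0:Int))
  let pre := st.1
  let total := pre.getD n 0
  if n = 0 then [0]
  else
    let remap : List Int := [0, 2, 1]
    let mid := (PySem.List.pyRange 1 (n:Int)).map (fun j =>
      remap.getD (pre.getD j.toNat 0 + PySem.Int.mod (total + pre.getD (n - j.toNat) 0) 2).toNat 0)
    [0] ++ mid ++ [remap.getD (2 * total).toNat 0]

-- ===== PRECONDITION & SPEC =====
def Spec_avaliable (s : List Int) (out : List Int) : Prop := out = avaliable_alt s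
instance (s : List Int) (out : List Int) : Decidable (Spec_avaliable s out) := by unfold Spec_avaliable; infer_instance

-- ===== CLAIM (what is proved, stated in full; the proofs are below) =====
def Claim_equal_avaliable : Prop := ∀ (s : List Int), Dom_avaliable s → Spec_avaliable s (avaliable s)

-- ===== LEMMAS AND PROOFS =====

-- parity of the sum of the first k elements (the semantic object both programs track)
def pref (s : List Int) (k : Nat) : Int := (s.take k).sum % 2
-- the contribution A's backward index len(s)-i delivers, expressed at index j
def btab (s : List Int) (j : Nat) : Int := (pref s s.length + pref s (s.length - j)) % 2
-- A's pars array after the loop and the two end doublings, in closed form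
def FA (s : List Int) (j : Nat) : Int :=
  if j = 0 then 0 else if j = s.length then 2 * pref s s.length else pref s j + btab s j
-- the final remap 0↦0, 1↦2, 2↦1
def remapF (v : Int) : Int := if v = 0 then 0 else if v = 1 then 2 else if v = 2 then 1 else v
-- A's pars array after i loop iterations, in closed form
def parsA (s : List Int) (i : Nat) : List Int :=
  (List.range (s.length+1)).map (fun j =>
    (if j < i then pref s j else 0) + (if s.length - j < i then btab s j else 0))

theorem mod2 (a : Int) : PySem.Int.mod a 2 = a % 2 :=
  PySem.Int.mod_eq_emod_of_pos (by norm_num)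

theorem set_map_range {m j : Nat} (f : Nat → Int) (v : Int) (h : j < m) :
    ((List.range m).map f).set j v = (List.range m).map (fun k => if k = j then v else f k) := by
  apply List.ext_getElem
  · simp
  · intro i h1 h2
    simp only [List.getElem_set, List.getElem_map, List.getElem_range]
    rcases eq_or_ne i j with rfl | hne
    · simp
    · simp [hne, Ne.symm hne]

theorem take_sum (s : List Int) (i : Nat) (h : i < s.length) :
    (s.take (i+1)).sum = (s.take i).sum + s.getD i 0 := by
  rw [List.take_add_one, List.getElem?_eq_getElem h]
  simp only [Option.toList_some, List.sum_append, List.sum_cons, List.sum_nil, add_zero,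
    List.getD_eq_getElem?_getD, List.getElem?_eq_getElem h, Option.getD_some]

-- the array part of one loop step, in closed form
theorem parsA_step (s : List Int) (i : Nat) (h : i < s.length) :
    ((parsA s i).set i ((parsA s i).getD i 0 + pref s i)).set (s.length - i)
      ((((parsA s i).set i ((parsA s i).getD i 0 + pref s i)).getD (s.length - i) 0)
        + (pref s s.length + pref s i) % 2)
    = parsA s (i+1) := by
  have hn : i < s.length + 1 := by omega
  have hni : s.length - i < s.length + 1 := by omega
  simp only [parsA]
  rw [PySem.List.getD_map_range _ _ _ _ hn, set_map_range _ _ hn,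
      PySem.List.getD_map_range _ _ _ _ hni, set_map_range _ _ hni]
  apply List.map_congr_left
  intro j hj
  simp only [List.mem_range] at hj
  have hsub : s.length - (s.length - i) = i := by omega
  split_ifs
  all_goals try (exfalso; omega)
  all_goals subst_vars
  all_goals try simp only [btab, hsub]
  all_goals try omega
  all_goals (simp_all; try omega)

theorem loopA (s : List Int) (i : Nat) (h : i ≤ s.length) :
    (List.range i).foldl (avaliableStep s s.length)
      ((List.range (s.length+1)).map (fun _ => (0:Int)), 0, PySem.Int.mod s.sum 2)
    = (parsA s i, pref s i, (pref s s.length + pref s i) % 2) := by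
  induction i with
  | zero =>
    simp only [List.range_zero, List.foldl_nil, Prod.mk.injEq]
    refine ⟨?_, ?_, ?_⟩
    · simp [parsA]
    · simp [pref]
    · simp [pref]
  | succ i ih =>
    have hi : i < s.length := by omega
    rw [show List.range (i+1) = List.range i ++ [i] from List.range_succ, List.foldl_append, ih (by omega)]
    simp only [List.foldl_cons, List.foldl_nil, avaliableStep]
    have hps : pref s (i+1) = (pref s i + s.getD i 0) % 2 := by
      rw [pref, take_sum s i hi, pref]; omega
    split_ifs with hodd
    all_goals simp only [Prod.mk.injEq]
    all_goals refine ⟨parsA_step s i hi, ?_, ?_⟩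
    all_goals rw [mod2] at hodd
    all_goals simp only [pref] at *
    all_goals omega

theorem fold_remap (l cp : List Int) (h : ∀ v ∈ l, v = 0 ∨ v = 1 ∨ v = 2) :
    l.foldl (fun cp i =>
      if i = 0 then cp ++ [(0:Int)]
      else if i = 1 then cp ++ [2]
      else if i = 2 then cp ++ [1]
      else cp) cp = cp ++ l.map remapF := by
  induction l generalizing cp with
  | nil => simp
  | cons x xs ih =>
    have hx := h x (by simp)
    simp only [List.foldl_cons, List.map_cons]
    rw [ih _ (fun v hv => h v (by simp [hv]))]
    rcases hx with h0 | h1 | h2 <;> subst_vars <;> simp [remapF]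

theorem FA_mem (s : List Int) (j : Nat) : FA s j = 0 ∨ FA s j = 1 ∨ FA s j = 2 := by
  simp only [FA, btab, pref]
  split_ifs <;> omega

theorem doubling (s : List Int) :
    (((parsA s s.length).set 0 ((parsA s s.length).getD 0 0 * 2)).set s.length
      ((((parsA s s.length).set 0 ((parsA s s.length).getD 0 0 * 2)).getD s.length 0) * 2))
    = (List.range (s.length+1)).map (FA s) := by
  have h0 : (0:Nat) < s.length + 1 := by omega
  have hn : s.length < s.length + 1 := by omega
  simp only [parsA]
  rw [PySem.List.getD_map_range _ _ _ _ h0, set_map_range _ _ h0,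
      PySem.List.getD_map_range _ _ _ _ hn, set_map_range _ _ hn]
  apply List.map_congr_left
  intro j hj
  simp only [List.mem_range] at hj
  simp only [FA, btab, pref]
  split_ifs
  all_goals simp_all
  all_goals omega

theorem A_model (s : List Int) :
    avaliable s = (List.range (s.length+1)).map (fun j => remapF (FA s j)) := by
  unfold avaliable
  simp only []
  rw [loopA s s.length le_rfl]
  rw [doubling s]
  rw [fold_remap _ _ (fun v hv => by
    simp only [List.mem_map] at hv
    obtain ⟨j, _, rfl⟩ := hv
    exact FA_mem s j)]
  simp [List.map_map, Function.comp]

theorem B_prefix (s : List Int) :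
    s.foldl (fun (st : List Int × Int) x =>
      let p := PySem.Int.mod (st.2 + x) 2
      (st.1 ++ [p], p)) ([(0:Int)], (0:Int))
    = ((List.range (s.length+1)).map (pref s), pref s s.length) := by
  induction s using List.reverseRecOn with
  | nil => simp [pref]
  | append_singleton xs x ih =>
    rw [List.foldl_append, ih]
    simp only [List.foldl_cons, List.foldl_nil]
    have hpk : ∀ k, k ≤ xs.length → pref (xs ++ [x]) k = pref xs k := by
      intro k hk
      simp [pref, List.take_append_of_le_length hk]
    have hlast : PySem.Int.mod (pref xs xs.length + x) 2 = pref (xs ++ [x]) (xs.length + 1) := by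
      rw [mod2]
      simp [pref, List.take_length]
    simp only [List.length_append, List.length_cons, List.length_nil, zero_add, Prod.mk.injEq]
    constructor
    · symm
      rw [show xs.length + 1 + 1 = (xs.length + 1) + 1 from rfl, List.range_succ, List.map_append,
          List.map_singleton, ← hlast]
      congr 1
      rw [List.range_succ, List.map_append, List.map_singleton, hpk _ le_rfl,
          List.map_append, List.map_singleton]
      congr 1
      apply List.map_congr_left
      intro k hk
      simp only [List.mem_range] at hk
      exact hpk k (by omega)
    · exact hlast

theorem pyRange_map (a m : Nat) (f : Int → Int) :
    (PySem.List.pyRange (a:Int) ((a+m : Nat):Int)).map f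
    = (List.range' a m).map (fun (j : Nat) => f (j:Int)) := by
  induction m with
  | zero => simp
  | succ m ih =>
    have : ((a + (m+1) : Nat) : Int) = ((a + m : Nat) : Int) + 1 := by push_cast; ring
    rw [this, PySem.List.pyRange_one_succ_right (by push_cast; omega), List.map_append, ih,
        List.range'_concat]
    simp

theorem remap_getD (v : Int) (h : v = 0 ∨ v = 1 ∨ v = 2) :
    ([0, 2, 1] : List Int).getD v.toNat 0 = remapF v := by
  rcases h with rfl | rfl | rfl <;> rfl

theorem pyRange_map1 (n : Nat) (f : Int → Int) (h : 1 ≤ n) :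
    (PySem.List.pyRange 1 ((n:Nat):Int)).map f = (List.range' 1 (n-1)).map (fun (j : Nat) => f (j:Int)) := by
  have h2 := pyRange_map 1 (n-1) f
  rw [Nat.cast_one] at h2
  rw [show ((n:Nat):Int) = ((1 + (n-1) : Nat) : Int) by push_cast; omega]
  exact h2

theorem range_decomp (n : Nat) (h : 0 < n) :
    List.range (n+1) = 0 :: (List.range' 1 (n-1) ++ [n]) := by
  have h1 : List.range n = 0 :: List.range' 1 (n-1) := by
    rw [List.range_eq_range']
    conv_lhs => rw [show n = (n-1)+1 by omega]
    rw [List.range'_succ]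
  rw [List.range_succ, h1]
  simp

theorem mid_entry (s : List Int) (k : Nat) (h1 : 1 ≤ k) (h2 : k < s.length) :
    ([0,2,1] : List Int).getD
      (((List.map (pref s) (List.range (s.length + 1))).getD ((k : Nat) : Int).toNat 0 +
        PySem.Int.mod (pref s s.length +
          (List.map (pref s) (List.range (s.length + 1))).getD (s.length - ((k : Nat) : Int).toNat) 0) 2).toNat) 0
    = remapF (FA s k) := by
  rw [show (((k : Nat) : Int)).toNat = k by simp]
  rw [PySem.List.getD_map_range _ _ _ _ (by omega : k < s.length + 1),
      PySem.List.getD_map_range _ _ _ _ (by omega : s.length - k < s.length + 1), mod2]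
  rw [remap_getD _ (by simp only [pref]; omega)]
  rw [show FA s k = pref s k + btab s k by rw [FA, if_neg (by omega), if_neg (by omega)], btab]

theorem B_model (s : List Int) :
    avaliable_alt s = (List.range (s.length+1)).map (fun j => remapF (FA s j)) := by
  unfold avaliable_alt
  simp only []
  rw [B_prefix]
  by_cases hs : s.length = 0
  · rw [List.length_eq_zero_iff] at hs
    subst hs
    rfl
  · rw [if_neg hs]
    have hn1 : 0 < s.length := by omega
    have htot : (List.map (pref s) (List.range (s.length + 1))).getD s.length 0 = pref s s.length :=
      PySem.List.getD_map_range _ _ _ _ (by omega)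
    rw [htot, pyRange_map1 _ _ hn1]
    conv_rhs => rw [range_decomp s.length hn1, List.map_cons, List.map_append, List.map_cons,
                    List.map_nil]
    simp only [List.cons_append, List.nil_append]
    refine congrArg₂ (· :: ·) ?_ (congrArg₂ (· ++ ·) ?_ ?_)
    · simp [FA, remapF]
    · apply List.map_congr_left
      intro k hk
      simp only [List.mem_range'] at hk
      obtain ⟨i, hi, rfl⟩ := hk
      have hme := mid_entry s (1 + 1*i) (by omega) (by omega)
      simpa using hme
    · rw [remap_getD _ (by simp only [pref]; omega)]
      rw [show FA s s.length = 2 * pref s s.length by rw [FA, if_neg (by omega), if_pos rfl]]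

-- ===== VERDICT (by name: the statement is the Claim_ definition above) =====
theorem avaliable_spec : Claim_equal_avaliable := by
  intro s _
  unfold Spec_avaliable
  rw [A_model, B_model]
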